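-- pv_equiv track=rewrite | github.com/YBIGTA/28th-project-posecoach | utils/activity_segment.py | _active_segments_from_flags
-- ===== SOURCE A (Python) =====
-- def _active_segments_from_flags(flags):
--     segments = []
--     in_seg = False
--     seg_start = 0
--     for idx, active in enumerate(flags):
--         if active and not in_seg:
--             seg_start = idx
--             in_seg = True
--         if not active and in_seg:
--             segments.append((seg_start, idx - 1))
--             in_seg = False
--     if in_seg:
--         segments.append((seg_start, len(flags) - 1))
--     return segments
-- ===== SOURCE B (Python) =====
-- def _active_segments_from_flags(flags):
--     # Run scanner: find each maximal run of equal truthiness with an inner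
--     # scan, emit the run's bounds when it is active; no state flag, no flush.
--     segments = []
--     i, n = 0, len(flags)
--     while i < n:
--         j = i
--         while j < n and bool(flags[j]) == bool(flags[i]):
--             j += 1
--         if flags[i]:
--             segments.append((i, j - 1))
--         i = j
--     return segments
-- ===== Notes on version B (the rewrite author's own statement) =====
-- stated objective: alternative
-- what changed: Replaced the in_seg/seg_start state machine with post-loop flush by a run scanner that consumes each maximal run of equal truthiness at once and emits its bounds when active.
import Mathlib
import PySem

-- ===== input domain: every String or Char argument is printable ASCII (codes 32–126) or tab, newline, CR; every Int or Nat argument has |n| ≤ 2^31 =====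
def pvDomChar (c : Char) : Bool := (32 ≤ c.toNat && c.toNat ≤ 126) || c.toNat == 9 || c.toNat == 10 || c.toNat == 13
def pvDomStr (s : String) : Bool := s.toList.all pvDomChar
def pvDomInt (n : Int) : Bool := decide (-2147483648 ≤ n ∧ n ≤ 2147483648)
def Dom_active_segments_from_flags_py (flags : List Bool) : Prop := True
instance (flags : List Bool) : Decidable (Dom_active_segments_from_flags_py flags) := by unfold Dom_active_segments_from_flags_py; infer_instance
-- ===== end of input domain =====

-- B replaces A's in_seg/seg_start state machine (with post-loop flush) by a run
-- scanner that consumes each maximal run of equal flags at once (alternative).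


-- ===== PORT A =====
-- the for-loop over enumerate(flags), carrying (segments, in_seg, seg_start)
def pvALoop : List Bool → Int → List (Int × Int) → Bool → Int → (List (Int × Int) × Bool × Int)
  | [], _, segments, in_seg, seg_start => (segments, in_seg, seg_start)
  | active :: rest, idx, segments, in_seg, seg_start =>
    let (in_seg, seg_start) :=
      if active && !in_seg then (true, idx) else (in_seg, seg_start)
    let (segments, in_seg) :=
      if !active && in_seg then (segments ++ [(seg_start, idx - 1)], false)
      else (segments, in_seg)
    pvALoop rest (idx + 1) segments in_seg seg_start

def active_segments_from_flags_py (flags : List Bool) : List (Int × Int) :=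
  match pvALoop flags 0 [] false 0 with
  | (segments, in_seg, seg_start) =>
    if in_seg then segments ++ [(seg_start, (flags.length : Int) - 1)] else segments

-- ===== PORT B =====
-- the outer while-loop of Source B: each step consumes one maximal run of flags
-- equal to the head (the inner scan = takeWhile/dropWhile), cursor `i`
def pvBGo : List Bool → Int → List (Int × Int)
  | [], _ => []
  | b :: rest, i =>
    let run : Int := (rest.takeWhile (· == b)).length + 1   -- j - i
    let tail := rest.dropWhile (· == b)
    (if b then [(i, i + run - 1)] else []) ++ pvBGo tail (i + run)
termination_by flags _ => flags.length
decreasing_by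
  have := List.length_dropWhile_le (· == b) rest
  simp; omega

def active_segments_from_flags_py_alt (flags : List Bool) : List (Int × Int) :=
  pvBGo flags 0

-- ===== PRECONDITION & SPEC =====
def Spec_active_segments_from_flags_py (flags : List Bool) (out : List (Int × Int)) : Prop := out = active_segments_from_flags_py_alt flags
instance (flags : List Bool) (out : List (Int × Int)) : Decidable (Spec_active_segments_from_flags_py flags out) := by unfold Spec_active_segments_from_flags_py; infer_instance

-- ===== CLAIM (what is proved, stated in full; the proofs are below) =====
def Claim_equal_active_segments_from_flags_py : Prop := ∀ (flags : List Bool), Dom_active_segments_from_flags_py flags → Spec_active_segments_from_flags_py flags (active_segments_from_flags_py flags)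

-- ===== LEMMAS AND PROOFS =====

-- the flush after the loop, as a function of the end index and the final state
def pvFinish (endIdx : Int) : List (Int × Int) × Bool × Int → List (Int × Int)
  | (segments, in_seg, seg_start) =>
    if in_seg then segments ++ [(seg_start, endIdx - 1)] else segments

-- one-step reference versions of B's run scanner: `pvRef` = scanner between
-- runs, `pvRefC` = scanner inside an open active run started at `s`
mutual
def pvRef : List Bool → Int → List (Int × Int)
  | [], _ => []
  | true :: rest, idx => pvRefC rest (idx + 1) idx
  | false :: rest, idx => pvRef rest (idx + 1)
def pvRefC : List Bool → Int → Int → List (Int × Int)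
  | [], idx, s => [(s, idx - 1)]
  | true :: rest, idx, s => pvRefC rest (idx + 1) s
  | false :: rest, idx, s => (s, idx - 1) :: pvRef rest (idx + 1)
end

-- skipping a whole false-run equals skipping one false at a time
theorem pvBGo_false (rest : List Bool) :
    ∀ idx : Int, pvBGo (false :: rest) idx = pvBGo rest (idx + 1) := by
  induction rest with
  | nil => intro idx; simp [pvBGo]
  | cons b r ih =>
    intro idx
    cases b with
    | false =>
      simp only [pvBGo, List.takeWhile, List.dropWhile]
      norm_num
      congr 1
      ring
    | true =>
      simp [pvBGo, List.takeWhile, List.dropWhile]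

theorem pvBGo_eq_ref (flags : List Bool) :
    ∀ idx : Int, pvBGo flags idx = pvRef flags idx ∧
      ∀ s : Int, ((s, idx + ((flags.takeWhile (· == true)).length : Int) - 1) ::
          pvBGo (flags.dropWhile (· == true)) (idx + (flags.takeWhile (· == true)).length))
        = pvRefC flags idx s := by
  induction flags with
  | nil =>
    intro idx
    exact ⟨by simp [pvBGo, pvRef], fun s => by simp [pvBGo, pvRefC]⟩
  | cons b rest ih =>
    intro idx
    cases b with
    | false =>
      constructor
      · rw [pvBGo_false rest idx]
        simpa [pvRef] using (ih (idx + 1)).1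
      · intro s
        simp only [List.takeWhile, List.dropWhile, show ((false == true) = false) from rfl,
          pvRefC]
        norm_num
        rw [pvBGo_false rest idx, (ih (idx + 1)).1]
    | true =>
      constructor
      · have h := (ih (idx + 1)).2 idx
        simp only [pvRef]
        rw [← h]
        simp only [pvBGo]
        norm_num
        constructor
        · ring_nf
        · congr 1; ring
      · intro s
        have h := (ih (idx + 1)).2 s
        simp only [pvRefC]
        rw [← h]
        simp only [List.takeWhile, List.dropWhile]
        norm_num
        constructor
        · ring_nf
        · congr 1; ring

theorem pvALoop_ref (flags : List Bool) :
    ∀ (idx : Int) (segs : List (Int × Int)) (s : Int),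
      pvFinish (idx + flags.length) (pvALoop flags idx segs false s) = segs ++ pvRef flags idx ∧
      pvFinish (idx + flags.length) (pvALoop flags idx segs true s) = segs ++ pvRefC flags idx s := by
  induction flags with
  | nil => intro idx segs s; constructor <;> simp [pvALoop, pvFinish, pvRef, pvRefC]
  | cons b rest ih =>
    intro idx segs s
    have e : idx + ((b :: rest).length : Int) = (idx + 1) + rest.length := by
      simp only [List.length_cons]; push_cast; ring
    cases b with
    | false =>
      rw [e]
      exact ⟨(ih (idx + 1) segs s).1,
        by simpa [pvRefC] using (ih (idx + 1) (segs ++ [(s, idx - 1)]) s).1⟩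
    | true =>
      rw [e]
      exact ⟨(ih (idx + 1) segs idx).2, (ih (idx + 1) segs s).2⟩

-- ===== VERDICT (by name: the statement is the Claim_ definition above) =====
theorem active_segments_from_flags_py_spec : Claim_equal_active_segments_from_flags_py := by
  intro flags _
  unfold Spec_active_segments_from_flags_py active_segments_from_flags_py active_segments_from_flags_py_alt
  have h := (pvALoop_ref flags 0 [] 0).1
  rw [zero_add] at h
  rw [show (match pvALoop flags 0 [] false 0 with
      | (segments, in_seg, seg_start) =>
        if in_seg then segments ++ [(seg_start, (flags.length : Int) - 1)] else segments)
      = pvFinish flags.length (pvALoop flags 0 [] false 0) from rfl, h,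
    (pvBGo_eq_ref flags 0).1]
  simp
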